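-- pv_equiv track=rewrite | github.com/Demon-Sheriff/tts-inference | tensorrt_tts/helpers/inference.py | redistribute_codes
-- ===== SOURCE A (Python) =====
-- FRAME_SIZE = 7
--
-- POSITION_OFFSETS = [0, 4096, 8192, 12288, 16384, 20480, 24576]
--
-- def redistribute_codes(codes: list[int]) -> tuple[list[int], list[int], list[int]]:
--     """
--     Redistribute flat audio codes into SNAC layers.
--
--     Frame structure: [c0, c1, c2, c3, c4, c5, c6]
--     - Layer 0: position 0 (1 per frame)
--     - Layer 1: positions 1, 4 (2 per frame)
--     - Layer 2: positions 2, 3, 5, 6 (4 per frame)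
--
--     The model adds offset = 4096 * position to each code.
--     We subtract to get valid 0-4095 codes.
--     """
--     num_frames = len(codes) // FRAME_SIZE
--     codes = codes[:num_frames * FRAME_SIZE]
--
--     layer0 = []
--     layer1 = []
--     layer2 = []
--
--     for frame_idx in range(num_frames):
--         base = frame_idx * FRAME_SIZE
--
--         def get_code(pos):
--             raw = codes[base + pos] - POSITION_OFFSETS[pos]
--             return max(0, min(4095, raw))
--
--         # Layer 0: position 0
--         layer0.append(get_code(0))
--
--         # Layer 1: positions 1, 4
--         layer1.append(get_code(1))
--         layer1.append(get_code(4))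
--
--         # Layer 2: positions 2, 3, 5, 6
--         layer2.append(get_code(2))
--         layer2.append(get_code(3))
--         layer2.append(get_code(5))
--         layer2.append(get_code(6))
--
--     return layer0, layer1, layer2
-- ===== SOURCE B (Python) =====
-- def redistribute_codes(codes: list[int]) -> tuple[list[int], list[int], list[int]]:
--     """Strided-column re-implementation: build the seven per-position columns
--     with a strided index range, clamp each, and interleave columns into layers."""
--     stop = len(codes) // 7 * 7
--
--     def col(p):
--         return [max(0, min(4095, codes[i] - 4096 * p)) for i in range(p, stop, 7)]
--
--     layer1 = [x for pair in zip(col(1), col(4)) for x in pair]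
--     layer2 = [x for quad in zip(col(2), col(3), col(5), col(6)) for x in quad]
--     return col(0), layer1, layer2
-- ===== Notes on version B (the rewrite author's own statement) =====
-- stated objective: idiomatic
-- what changed: Replaced the per-frame loop with seven nested appends by strided per-position columns (codes[p::7] via range(p, stop, 7)) that are clamped once and interleaved with zip to form the layers.
import Mathlib
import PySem

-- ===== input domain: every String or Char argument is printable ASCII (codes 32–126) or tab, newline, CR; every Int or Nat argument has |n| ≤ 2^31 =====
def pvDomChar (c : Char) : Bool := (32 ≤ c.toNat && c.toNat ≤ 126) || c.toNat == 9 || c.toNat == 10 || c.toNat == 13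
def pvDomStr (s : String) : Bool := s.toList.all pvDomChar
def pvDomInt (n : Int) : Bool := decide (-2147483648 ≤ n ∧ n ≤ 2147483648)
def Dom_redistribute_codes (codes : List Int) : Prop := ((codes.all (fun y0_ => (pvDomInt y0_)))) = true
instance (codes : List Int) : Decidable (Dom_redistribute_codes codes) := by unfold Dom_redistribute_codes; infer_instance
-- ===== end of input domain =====

-- B replaces A's per-frame loop by clamped strided columns interleaved with zip (idiomatic decomposition, same cost).

-- ===== PORT A =====
def pvFRAME_SIZE : Int := 7
def pvPOSITION_OFFSETS : List Int := [0, 4096, 8192, 12288, 16384, 20480, 24576]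

def redistribute_codes (codes : List Int) : List Int × List Int × List Int :=
  let num_frames : Int := PySem.Int.floordiv (codes.length : Int) pvFRAME_SIZE
  let codes' : List Int := PySem.List.slice codes none (some (num_frames * pvFRAME_SIZE))
  (PySem.List.pyRange 0 num_frames 1).foldl
    (fun (acc : List Int × List Int × List Int) frame_idx =>
      let base := frame_idx * pvFRAME_SIZE
      -- codes[base+pos] and POSITION_OFFSETS[pos] are always in range here, so getD 0 is exact
      let get_code : Int → Int := fun pos =>
        max 0 (min 4095 (PySem.List.pyGetD codes' (base + pos) 0 - PySem.List.pyGetD pvPOSITION_OFFSETS pos 0))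
      (acc.1 ++ [get_code 0],
       acc.2.1 ++ [get_code 1, get_code 4],
       acc.2.2 ++ [get_code 2, get_code 3, get_code 5, get_code 6]))
    ([], [], [])

-- ===== PORT B =====
def redistribute_codes_alt (codes : List Int) : List Int × List Int × List Int :=
  let stop : Int := PySem.Int.floordiv (codes.length : Int) 7 * 7
  -- codes[i] is always in range for i ∈ range(p, stop, 7), so getD 0 is exact
  let col : Int → List Int := fun p =>
    (PySem.List.pyRange p stop 7).map (fun i => max 0 (min 4095 (PySem.List.pyGetD codes i 0 - 4096 * p)))
  (col 0,
   -- zip(col 1, col 4) flattened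
   ((col 1).zip (col 4)).flatMap (fun ab => [ab.1, ab.2]),
   -- zip of four equal-length lists, ported as nested zips of pairs — exact here
   (((col 2).zip (col 3)).zip ((col 5).zip (col 6))).flatMap (fun q => [q.1.1, q.1.2, q.2.1, q.2.2]))

-- ===== PRECONDITION & SPEC =====
def Spec_redistribute_codes (codes : List Int) (out : List Int × List Int × List Int) : Prop := out = redistribute_codes_alt codes
instance (codes : List Int) (out : List Int × List Int × List Int) : Decidable (Spec_redistribute_codes codes out) := by unfold Spec_redistribute_codes; infer_instance

-- ===== CLAIM (what is proved, stated in full; the proofs are below) =====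
def Claim_equal_redistribute_codes : Prop := ∀ (codes : List Int), Dom_redistribute_codes codes → Spec_redistribute_codes codes (redistribute_codes codes)

-- ===== LEMMAS AND PROOFS =====

-- A triple of append-accumulators folds to a triple of flatMaps.
theorem pv_foldl_triple {α : Type} (f g h : α → List Int) (l : List α)
    (a b c : List Int) :
    l.foldl (fun (acc : List Int × List Int × List Int) x =>
        (acc.1 ++ f x, acc.2.1 ++ g x, acc.2.2 ++ h x)) (a, b, c)
      = (a ++ l.flatMap f, b ++ l.flatMap g, c ++ l.flatMap h) := by
  induction l generalizing a b c with
  | nil => simp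
  | cons x xs ih => simp [ih]

-- The strided range range(p, 7n, 7) for 0 ≤ p < 7 has exactly n entries p + 7k.
theorem pv_pyRange_strided (p : Int) (n : Nat) (hp0 : 0 ≤ p) (hp7 : p < 7) :
    PySem.List.pyRange p ((n : Int) * 7) 7
      = (List.range n).map (fun (k : Nat) => p + 7 * (k : Int)) := by
  rw [PySem.List.pyRange_of_pos p ((n : Int) * 7) (by norm_num)]
  have hcnt : (if p < (n : Int) * 7 then (((n : Int) * 7 - p + 7 - 1) / 7).toNat else 0) = n := by
    split_ifs with h <;> omega
  rw [hcnt]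

theorem pv_getD_take (xs : List Int) (m : Nat) (i : Int) (h0 : 0 ≤ i) (h : i < (m : Int)) :
    PySem.List.pyGetD (xs.take m) i 0 = PySem.List.pyGetD xs i 0 := by
  rw [PySem.List.pyGetD_of_nonneg _ _ h0, PySem.List.pyGetD_of_nonneg _ _ h0,
      List.getD_eq_getElem?_getD, List.getD_eq_getElem?_getD,
      List.getElem?_take_of_lt (by omega : i.toNat < m)]

theorem pv_map_eq_flatMap {α β : Type} (f : α → β) (l : List α) :
    List.map f l = l.flatMap (fun a => [f a]) := by
  rw [← List.flatMap_singleton' (l.map f), List.flatMap_map]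

-- ===== VERDICT (by name: the statement is the Claim_ definition above) =====
theorem redistribute_codes_spec : Claim_equal_redistribute_codes := by
  intro codes _
  unfold Spec_redistribute_codes
  simp only [redistribute_codes, redistribute_codes_alt, pvFRAME_SIZE]
  set N : Nat := codes.length / 7 with hN
  have hfd : PySem.Int.floordiv (codes.length : Int) 7 = (N : Int) := by
    rw [PySem.Int.floordiv_eq_ediv_of_pos (by norm_num)]; omega
  rw [hfd]
  have hslice : PySem.List.slice codes none (some ((N : Int) * 7)) = codes.take (N * 7) := by
    have h77 : (N : Int) * 7 = ((N * 7 : Nat) : Int) := by push_cast; ring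
    rw [h77, PySem.List.slice_to_natCast]
  rw [hslice, PySem.List.pyRange_one, List.foldl_map]
  simp only [Int.sub_zero, Int.toNat_natCast]
  rw [pv_foldl_triple]
  have hOP : ∀ (k : Nat), k < N → ∀ (p : Int), 0 ≤ p → p < 7 →
      PySem.List.pyGetD (codes.take (N * 7)) ((0 + (k : Int)) * 7 + p) 0
        = PySem.List.pyGetD codes (p + 7 * (k : Int)) 0 := by
    intro k hk p hp0 hp7
    have he : (0 + (k : Int)) * 7 + p = p + 7 * (k : Int) := by ring
    rw [he, pv_getD_take _ _ _ (by omega) (by push_cast; omega)]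
  have h0 : PySem.List.pyGetD pvPOSITION_OFFSETS 0 0 = 0 := by decide
  have h1 : PySem.List.pyGetD pvPOSITION_OFFSETS 1 0 = 4096 := by decide
  have h2 : PySem.List.pyGetD pvPOSITION_OFFSETS 2 0 = 8192 := by decide
  have h3 : PySem.List.pyGetD pvPOSITION_OFFSETS 3 0 = 12288 := by decide
  have h4 : PySem.List.pyGetD pvPOSITION_OFFSETS 4 0 = 16384 := by decide
  have h5 : PySem.List.pyGetD pvPOSITION_OFFSETS 5 0 = 20480 := by decide
  have h6 : PySem.List.pyGetD pvPOSITION_OFFSETS 6 0 = 24576 := by decide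
  refine Prod.ext ?_ (Prod.ext ?_ ?_) <;> dsimp only
  · -- layer 0
    rw [pv_pyRange_strided 0 N (by norm_num) (by norm_num), List.map_map,
        pv_map_eq_flatMap, List.nil_append]
    refine List.flatMap_congr ?_
    intro k hk
    have hk' := List.mem_range.mp hk
    simp only [Function.comp_apply]
    rw [hOP k hk' 0 (by norm_num) (by norm_num), h0]
    norm_num
  · -- layer 1
    rw [pv_pyRange_strided 1 N (by norm_num) (by norm_num),
        pv_pyRange_strided 4 N (by norm_num) (by norm_num),
        List.map_map, List.map_map, List.zip_map', List.flatMap_map, List.nil_append]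
    refine List.flatMap_congr ?_
    intro k hk
    have hk' := List.mem_range.mp hk
    simp only [Function.comp_apply]
    rw [hOP k hk' 1 (by norm_num) (by norm_num), hOP k hk' 4 (by norm_num) (by norm_num), h1, h4]
    norm_num
  · -- layer 2
    rw [pv_pyRange_strided 2 N (by norm_num) (by norm_num),
        pv_pyRange_strided 3 N (by norm_num) (by norm_num),
        pv_pyRange_strided 5 N (by norm_num) (by norm_num),
        pv_pyRange_strided 6 N (by norm_num) (by norm_num),
        List.map_map, List.map_map, List.map_map, List.map_map,
        List.zip_map', List.zip_map', List.zip_map', List.flatMap_map, List.nil_append]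
    refine List.flatMap_congr ?_
    intro k hk
    have hk' := List.mem_range.mp hk
    simp only [Function.comp_apply]
    rw [hOP k hk' 2 (by norm_num) (by norm_num), hOP k hk' 3 (by norm_num) (by norm_num),
        hOP k hk' 5 (by norm_num) (by norm_num), hOP k hk' 6 (by norm_num) (by norm_num),
        h2, h3, h5, h6]
    norm_num
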